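-- pv_equiv track=rewrite | github.com/patelrajnath/dl4nlp-py | dl4nlp/utils.py | contextwin
-- ===== SOURCE A (Python) =====
-- def contextwin(l, win):
--     '''
--     win :: int corresponding to the size of the window
--     given a list of indexes composing a sentence
--     it will return a list of list of indexes corresponding
--     to context windows surrounding each word in the sentence
--     '''
--     assert (win % 2) == 1
--     assert win >=1
--     l = list(l)
--
--     lpadded = int(win/2) * [0] + l + int(win/2) * [0]
--     out = [lpadded[i:i+win] for i in range(len(l))]
--
--     assert len(out) == len(l)
--     return out
-- ===== SOURCE B (Python) =====
-- def contextwin(l, win):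
--     '''
--     Same contract as A, computed without the zero-padded buffer:
--     each window is built by per-element index checks around position i.
--     '''
--     assert (win % 2) == 1
--     assert win >= 1
--     l = list(l)
--     n = len(l)
--     half = win // 2
--     out = []
--     for i in range(n):
--         out.append([l[i + d] if 0 <= i + d < n else 0 for d in range(-half, half + 1)])
--     assert len(out) == n
--     return out
-- ===== Notes on version B (the rewrite author's own statement) =====
-- stated objective: alternative
-- what changed: B drops A's zero-padded buffer and slicing entirely: each context window is built directly by per-offset bounds-checked indexing into the original list (out-of-range positions contribute 0).
import Mathlib
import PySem

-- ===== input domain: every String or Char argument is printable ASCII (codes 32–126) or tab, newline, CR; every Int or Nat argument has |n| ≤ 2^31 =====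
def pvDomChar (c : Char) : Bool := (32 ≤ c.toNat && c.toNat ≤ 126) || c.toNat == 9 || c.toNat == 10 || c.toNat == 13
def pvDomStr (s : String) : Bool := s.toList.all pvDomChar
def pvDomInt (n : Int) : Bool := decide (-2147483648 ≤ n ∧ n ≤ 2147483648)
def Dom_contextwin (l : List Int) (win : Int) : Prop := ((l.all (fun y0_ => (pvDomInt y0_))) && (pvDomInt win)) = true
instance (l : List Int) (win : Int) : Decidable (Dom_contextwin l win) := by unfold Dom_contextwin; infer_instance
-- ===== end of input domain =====

-- B builds each context window by per-offset bounds-checked indexing instead of slicing A's zero-padded buffer (alternative decomposition, same cost).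


-- ===== PORT A =====
-- literal port of Source A: half = int(win/2) (trunc division), zero-padded buffer,
-- out = [lpadded[i:i+win] for i in range(len(l))]
def contextwin (l : List Int) (win : Int) : List (List Int) :=
  let half := PySem.Int.truncdiv win 2
  let lpadded := List.replicate half.toNat (0:Int) ++ l ++ List.replicate half.toNat (0:Int)
  (PySem.List.pyRange 0 (l.length : Int) 1).map
    (fun i => PySem.List.slice lpadded (some i) (some (i + win)))

-- ===== PORT B =====
-- literal port of Source B: half = win // 2; per-offset bounds-checked indexing
-- (the guard 0 <= i+d < n makes l[i+d] total, so pyGetD's default is never the result)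
def contextwin_alt (l : List Int) (win : Int) : List (List Int) :=
  let n : Int := (l.length : Int)
  let half := PySem.Int.floordiv win 2
  (PySem.List.pyRange 0 n 1).map (fun i =>
    (PySem.List.pyRange (-half) (half + 1) 1).map (fun d =>
      if 0 ≤ i + d ∧ i + d < n then PySem.List.pyGetD l (i + d) 0 else 0))

-- ===== PRECONDITION & SPEC =====
-- A's two asserts: win must be odd and >= 1; on all other win it raises AssertionError.
def Pre_contextwin (l : List Int) (win : Int) : Prop := PySem.Int.mod win 2 = 1 ∧ 1 ≤ win
instance (l : List Int) (win : Int) : Decidable (Pre_contextwin l win) := by unfold Pre_contextwin; infer_instance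
def pvWitness_contextwin : List Int × Int := ([1, 2, 3], 3)

def Spec_contextwin (l : List Int) (win : Int) (out : List (List Int)) : Prop := out = contextwin_alt l win
instance (l : List Int) (win : Int) (out : List (List Int)) : Decidable (Spec_contextwin l win out) := by unfold Spec_contextwin; infer_instance

-- ===== CLAIM (what is proved, stated in full; the proofs are below) =====
def Claim_equal_contextwin : Prop := ∀ (l : List Int) (win : Int), Dom_contextwin l win → Pre_contextwin l win → Spec_contextwin l win (contextwin l win)

-- ===== LEMMAS AND PROOFS =====

lemma truncdiv_odd (h : Nat) : PySem.Int.truncdiv (2*(h:Int)+1) 2 = h := by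
  rw [PySem.Int.truncdiv, Int.tdiv_eq_ediv_of_nonneg (by positivity)]
  omega

lemma floordiv_odd (h : Nat) : PySem.Int.floordiv (2*(h:Int)+1) 2 = h :=
  (PySem.Int.floordiv_eq_iff_of_pos (by norm_num)).mpr ⟨by omega, by omega⟩

-- the element of A's padded buffer at position j
lemma pad_get (l : List Int) (h j : Nat) (hj : j < h + l.length + h) :
    (List.replicate h (0:Int) ++ l ++ List.replicate h 0)[j]'(by simp; omega) =
    if hc : h ≤ j ∧ j < h + l.length then l[j - h]'(by omega) else 0 := by
  split_ifs with hc
  · rw [List.getElem_append_left (by simp; omega), List.getElem_append_right (by simp; omega)]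
    simp
  · by_cases hl : j < h
    · rw [List.getElem_append_left (by simp; omega), List.getElem_append_left (by simpa using hl)]
      simp
    · rw [List.getElem_append_right (by simp; omega)]
      simp

-- A's slice window equals B's bounds-checked window, for each position i of the sentence
lemma window_eq (l : List Int) (h : Nat) (i : Int) (h0 : 0 ≤ i) (h1 : i < (l.length:Int)) :
    PySem.List.slice (List.replicate h (0:Int) ++ l ++ List.replicate h 0)
        (some i) (some (i + (2*(h:Int)+1))) =
    (PySem.List.pyRange (-(h:Int)) ((h:Int)+1) 1).map (fun d =>
      if 0 ≤ i + d ∧ i + d < (l.length:Int) then PySem.List.pyGetD l (i + d) 0 else 0) := by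
  rw [PySem.List.slice_toNat _ h0 (by omega)]
  apply List.ext_getElem
  · simp [PySem.List.length_pyRange_one]
    omega
  · intro k hk1 hk2
    have hkw : k < 2*h + 1 := by
      simp [PySem.List.length_pyRange_one] at hk2; omega
    rw [List.getElem_take, List.getElem_drop, List.getElem_map,
        PySem.List.getElem_pyRange_one]
    rw [pad_get l h (i.toNat + k) (by omega)]
    split_ifs with hc hd hd
    · rw [PySem.List.pyGetD_eq_getElem _ _ (by omega) (by omega)]
      congr 1
      omega
    · exfalso; omega
    · exfalso; omega
    · rfl

lemma main_eq (l : List Int) (win : Int) (hp : Pre_contextwin l win) :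
    contextwin l win = contextwin_alt l win := by
  obtain ⟨hodd, hge⟩ := hp
  obtain ⟨h, rfl⟩ : ∃ h : Nat, win = 2*(h:Int)+1 := by
    refine ⟨((win - 1)/2).toNat, ?_⟩
    have := PySem.Int.floordiv_mul_add_mod win 2
    rw [hodd] at this
    rw [PySem.Int.floordiv_eq_ediv_of_pos (by norm_num)] at this
    omega
  unfold contextwin contextwin_alt
  simp only [truncdiv_odd, floordiv_odd, Int.toNat_natCast]
  apply List.map_congr_left
  intro i hi
  rw [PySem.List.mem_pyRange_one] at hi
  exact window_eq l h i hi.1 hi.2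

-- ===== VERDICT (by name: the statement is the Claim_ definition above) =====
theorem contextwin_spec : Claim_equal_contextwin := by
  intro l win _ hp
  unfold Spec_contextwin
  exact main_eq l win hp
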